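-- pv_equiv track=rewrite | github.com/dn789/email_forensics | get_pairs.py | check_keywords_for_entities
-- ===== SOURCE A (Python) =====
-- def check_keywords_for_entities(keywords, entities):
--     """Checks if any keyword is a word-by-word subset of any entity or vice-versa."""
--     matches = set()
--     for keyword in keywords:
--         keyword = ' ' + keyword.lower() + ' '
--         for entity in entities:
--             entity = ' ' + entity.lower() + ' '
--             if keyword in entity or entity in keyword:
--                 matches.add(entity.strip())
--     return matches
-- ===== SOURCE B (Python) =====
-- def _subphrases(s):
--     """All contiguous word sub-phrases of s (words = s.split(' '))."""
--     toks = s.split(' ')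
--     out = set()
--     for a in range(len(toks)):
--         for b in range(a, len(toks)):
--             out.add(' '.join(toks[a:b + 1]))
--     return out
--
--
-- def check_keywords_for_entities(keywords, entities):
--     """Checks if any keyword is a word-by-word subset of any entity or vice-versa."""
--     lows = [e.lower() for e in entities]
--     phrase_index = {}  # sub-phrase -> indices of entities containing it (increasing)
--     value_index = {}   # lowered entity -> its indices (increasing)
--     for i in range(len(lows)):
--         low = lows[i]
--         for ph in _subphrases(low):
--             phrase_index[ph] = phrase_index.get(ph, []) + [i]
--         value_index[low] = value_index.get(low, []) + [i]
--     matches = set()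
--     for keyword in keywords:
--         k = keyword.lower()
--         hits = set(phrase_index.get(k, []))
--         for ph in _subphrases(k):
--             hits.update(value_index.get(ph, []))
--         for i in sorted(hits):
--             matches.add(lows[i].strip())
--     return matches
-- ===== Notes on version B (the rewrite author's own statement) =====
-- stated objective: faster
-- what changed: Instead of A's K*E padded-substring scans, B lowers each entity once, indexes every contiguous word sub-phrase of every entity in a dict (phrase -> entity indices) plus a dict of entity values, and answers each keyword by hash lookups of the keyword and of its own sub-phrases, collecting matched entity indices.
import Mathlib
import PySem

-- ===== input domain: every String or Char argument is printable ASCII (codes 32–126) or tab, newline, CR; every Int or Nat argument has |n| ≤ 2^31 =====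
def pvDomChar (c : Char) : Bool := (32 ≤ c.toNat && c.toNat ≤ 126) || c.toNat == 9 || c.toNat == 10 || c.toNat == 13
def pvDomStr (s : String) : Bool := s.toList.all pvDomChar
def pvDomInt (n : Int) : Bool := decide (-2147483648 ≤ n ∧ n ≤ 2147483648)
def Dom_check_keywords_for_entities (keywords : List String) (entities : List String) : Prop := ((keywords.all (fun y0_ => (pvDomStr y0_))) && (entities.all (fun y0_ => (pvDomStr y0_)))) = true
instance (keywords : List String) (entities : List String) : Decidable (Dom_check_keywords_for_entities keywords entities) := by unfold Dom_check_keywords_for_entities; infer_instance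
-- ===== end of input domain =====

-- B replaces A's K×E padded-substring scans by indexing all contiguous word sub-phrases of the
-- entities in two dicts and looking up each keyword's phrases (objective: faster).


-- ===== PORT A =====
def check_keywords_for_entities (keywords : List String) (entities : List String) : List String :=
  keywords.foldl (fun mset keyword =>
    let kw := " " ++ PySem.Str.lower keyword ++ " "
    entities.foldl (fun mset entity =>
      let en := " " ++ PySem.Str.lower entity ++ " "
      if PySem.Str.isIn kw en || PySem.Str.isIn en kw then
        PySem.Set.add mset (PySem.Str.strip en)
      else mset) mset) []

-- ===== PORT B =====
-- all contiguous word sub-phrases of s (Source B's _subphrases)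
def subphrases (s : String) : PySem.Set String :=
  let toks := (PySem.Str.split? s " ").getD []
  (PySem.List.pyRange 0 toks.length).foldl (fun out a =>
    (PySem.List.pyRange a toks.length).foldl (fun out b =>
      PySem.Set.add out (PySem.Str.join " " (PySem.List.slice toks (some a) (some (b+1))))) out)
    PySem.Set.empty

def check_keywords_for_entities_alt (keywords : List String) (entities : List String) : List String :=
  let lows := entities.map PySem.Str.lower
  let idx := (PySem.List.pyRange 0 lows.length).foldl
      (fun (st : PySem.Dict String (List Int) × PySem.Dict String (List Int)) i =>
        let low := PySem.List.pyGetD lows i ""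
        let p1 := (subphrases low).foldl
          (fun d ph => d.insert ph (d.getD ph [] ++ [i])) st.1
        let p2 := st.2.insert low (st.2.getD low [] ++ [i])
        (p1, p2))
      (PySem.Dict.empty, PySem.Dict.empty)
  keywords.foldl (fun mset keyword =>
    let k := PySem.Str.lower keyword
    let hits := PySem.Set.ofList (idx.1.getD k [])
    let hits := (subphrases k).foldl (fun h ph => PySem.Set.update h (idx.2.getD ph [])) hits
    (PySem.List.sorted hits (fun x => x)).foldl
      (fun mset i => PySem.Set.add mset (PySem.Str.strip (PySem.List.pyGetD lows i "")))
      mset) []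

-- ===== PRECONDITION & SPEC =====
def Spec_check_keywords_for_entities (keywords : List String) (entities : List String) (out : List String) : Prop := out = check_keywords_for_entities_alt keywords entities
instance (keywords : List String) (entities : List String) (out : List String) : Decidable (Spec_check_keywords_for_entities keywords entities out) := by unfold Spec_check_keywords_for_entities; infer_instance

-- ===== CLAIM (what is proved, stated in full; the proofs are below) =====
def Claim_equal_check_keywords_for_entities : Prop := ∀ (keywords : List String) (entities : List String), Dom_check_keywords_for_entities keywords entities → Spec_check_keywords_for_entities keywords entities (check_keywords_for_entities keywords entities)

-- ===== LEMMAS AND PROOFS =====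

-- ---- bridging PySem's fuel-based split to Mathlib's List.splitOn ----
theorem modifyHead_id' {α : Type} (l : List α) : List.modifyHead (fun x => x) l = l := by
  cases l <;> rfl

theorem splitOn_go_spec (fuel : Nat) (l cur : List Char) (acc : List (List Char))
    (h : l.length < fuel) :
    PySem.Chars.splitOn.go [' '] fuel l cur acc
      = acc.reverse ++ (List.splitOn ' ' l).modifyHead (cur.reverse ++ ·) := by
  induction fuel generalizing l cur acc with
  | zero => omega
  | succ fuel ih =>
    cases l with
    | nil =>
      simp [PySem.Chars.splitOn.go, List.splitOn, List.splitOnP_nil]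
    | cons c rest =>
      rw [PySem.Chars.splitOn.go]
      by_cases hc : c = ' '
      · subst hc
        have hp : List.isPrefixOf [' '] (' ' :: rest) = true := by simp [List.isPrefixOf]
        simp only [hp, if_pos]
        rw [ih _ _ _ (by simp at h ⊢; omega)]
        simp [List.splitOn, List.splitOnP_cons, modifyHead_id']
      · have hp : List.isPrefixOf [' '] (c :: rest) = false := by
          simp [List.isPrefixOf]; exact fun h' => hc h'.symm
        simp only [hp, Bool.false_eq_true, if_false]
        rw [ih _ _ _ (by simp at h ⊢; omega)]
        have hce : (c == ' ') = false := by simpa using hc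
        simp only [List.splitOn, List.splitOnP_cons, hce, Bool.false_eq_true, if_false,
          List.modifyHead_modifyHead]
        cases List.splitOnP (fun x => x == ' ') rest <;> simp

theorem chars_splitOn_space (s : List Char) :
    PySem.Chars.splitOn s [' '] = List.splitOn ' ' s := by
  rw [PySem.Chars.splitOn, splitOn_go_spec _ _ _ _ (Nat.lt_succ_self _)]
  simp [modifyHead_id']

theorem toks_bridge (s : String) :
    ((PySem.Str.split? s " ").getD []).map String.toList = List.splitOn ' ' s.toList := by
  have h1 : (" ".toList) = [' '] := rfl
  simp only [PySem.Str.split?, PySem.Chars.split?, h1, List.isEmpty_cons, Bool.false_eq_true,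
    if_false, Option.map_some, Option.getD_some, chars_splitOn_space, List.map_map]
  have : (String.toList ∘ String.ofList) = (id : List Char → List Char) := by
    funext l; simp [String.toList_ofList]
  simp [this]

-- ---- facts about List.splitOn ' ' ----
theorem splitOn_ne_nil (s : List Char) : List.splitOn ' ' s ≠ [] := by
  simpa [List.splitOn] using List.splitOnP_ne_nil (fun x => x == ' ') s

theorem splitOn_cons_sep (x : List Char) :
    List.splitOn ' ' (' ' :: x) = [] :: List.splitOn ' ' x := by
  simp [List.splitOn, List.splitOnP_cons]

theorem splitOn_cons_ne {c : Char} (hc : c ≠ ' ') (x : List Char) :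
    List.splitOn ' ' (c :: x) = (List.splitOn ' ' x).modifyHead (c :: ·) := by
  have hce : (c == ' ') = false := by simpa using hc
  simp [List.splitOn, List.splitOnP_cons, hce]

theorem splitOn_sep_free (s : List Char) : ∀ t ∈ List.splitOn ' ' s, ' ' ∉ t := by
  induction s with
  | nil => intro t ht; simp [List.splitOn, List.splitOnP_nil] at ht; simp [ht]
  | cons c rest ih =>
    intro t ht
    by_cases hc : c = ' '
    · subst hc
      simp only [List.splitOn, List.splitOnP_cons, beq_self_eq_true, if_pos] at ht
      rcases List.mem_cons.mp ht with rfl | ht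
      · simp
      · exact ih t (by simpa [List.splitOn] using ht)
    · have hce : (c == ' ') = false := by simpa using hc
      simp only [List.splitOn, List.splitOnP_cons, hce, Bool.false_eq_true, if_false] at ht
      rcases hsp : List.splitOnP (fun x => x == ' ') rest with _ | ⟨h0, tl⟩
      · exact absurd hsp (by simpa [List.splitOn] using splitOn_ne_nil rest)
      · rw [hsp] at ht
        simp only [List.modifyHead] at ht
        rcases List.mem_cons.mp ht with rfl | ht
        · intro hmem
          rcases List.mem_cons.mp hmem with h' | h'
          · exact hc h'.symm
          · exact ih h0 (by simp [List.splitOn, hsp]) h'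
        · exact ih t (by simp [List.splitOn, hsp, ht])

-- ---- the padded-substring test is the word-boundary (token-infix) test ----
theorem prefix_pad_iff (e : List Char) : ∀ k : List Char,
    (k ++ [' ']) <+: (e ++ [' ']) ↔ List.splitOn ' ' k <+: List.splitOn ' ' e := by
  induction e with
  | nil =>
    intro k
    constructor
    · intro h
      have hl := h.length_le
      simp at hl
      subst hl
      simp [List.splitOn, List.splitOnP_nil]
    · intro h
      have : List.splitOn ' ' k = [[]] := by
        rcases hsp : List.splitOn ' ' k with _ | ⟨h0, tl⟩
        · exact absurd hsp (splitOn_ne_nil k)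
        · rw [hsp] at h
          simp only [List.splitOn, List.splitOnP_nil] at h
          rcases List.cons_prefix_cons.mp h with ⟨rfl, htl⟩
          simp at htl
          simp [htl]
      have hk : k = [' '].intercalate (List.splitOn ' ' k) := (List.intercalate_splitOn k ' ').symm
      rw [this] at hk
      simp [List.intercalate] at hk
      simp [hk]
  | cons c e' ih =>
    intro k
    cases k with
    | nil =>
      simp only [List.nil_append]
      by_cases hc : c = ' '
      · subst hc
        rw [splitOn_cons_sep]
        constructor
        · intro _
          simp [List.splitOn, List.splitOnP_nil]
        · intro _
          exact ⟨e' ++ [' '], by simp⟩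
      · rw [splitOn_cons_ne hc]
        constructor
        · intro h
          rcases List.cons_prefix_cons.mp h with ⟨h1, _⟩
          exact absurd h1.symm hc
        · intro h
          rcases hsp : List.splitOn ' ' e' with _ | ⟨h0, tl⟩
          · exact absurd hsp (splitOn_ne_nil e')
          · rw [hsp] at h
            simp only [List.modifyHead, List.splitOn, List.splitOnP_nil] at h
            rcases List.cons_prefix_cons.mp h with ⟨h1, _⟩
            simp at h1
    | cons d k' =>
      by_cases hc : c = ' ' <;> by_cases hd : d = ' '
      · subst hc; subst hd
        rw [splitOn_cons_sep, splitOn_cons_sep]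
        simp only [List.cons_append, List.cons_prefix_cons, true_and]
        rw [ih k']
      · subst hc
        rw [splitOn_cons_sep, splitOn_cons_ne hd]
        simp only [List.cons_append, List.cons_prefix_cons]
        constructor
        · rintro ⟨h1, _⟩; exact absurd h1 hd
        · intro h
          rcases hsp : List.splitOn ' ' k' with _ | ⟨h0, tl⟩
          · exact absurd hsp (splitOn_ne_nil k')
          · rw [hsp] at h
            simp only [List.modifyHead] at h
            rcases List.cons_prefix_cons.mp h with ⟨h1, _⟩
            simp at h1
      · subst hd
        rw [splitOn_cons_sep, splitOn_cons_ne hc]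
        simp only [List.cons_append, List.cons_prefix_cons]
        constructor
        · rintro ⟨h1, _⟩; exact absurd h1.symm hc
        · intro h
          rcases hsp : List.splitOn ' ' e' with _ | ⟨h0, tl⟩
          · exact absurd hsp (splitOn_ne_nil e')
          · rw [hsp] at h
            simp only [List.modifyHead] at h
            rcases List.cons_prefix_cons.mp h with ⟨h1, _⟩
            simp at h1
      · rw [splitOn_cons_ne hc, splitOn_cons_ne hd]
        rcases hspk : List.splitOn ' ' k' with _ | ⟨hk0, tk⟩
        · exact absurd hspk (splitOn_ne_nil k')
        rcases hspe : List.splitOn ' ' e' with _ | ⟨he0, te⟩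
        · exact absurd hspe (splitOn_ne_nil e')
        have ih' := ih k'
        rw [hspk, hspe] at ih'
        simp only [List.modifyHead, List.cons_append, List.cons_prefix_cons] at *
        constructor
        · rintro ⟨rfl, h2⟩
          rcases (ih'.mp h2) with ⟨h3, h4⟩
          exact ⟨by rw [h3], h4⟩
        · rintro ⟨h1, h2⟩
          obtain ⟨rfl, rfl⟩ : d = c ∧ hk0 = he0 := by
            injection h1 with a b; exact ⟨a, b⟩
          exact ⟨rfl, ih'.mpr ⟨rfl, h2⟩⟩

theorem pad_prefix_iff' (e k : List Char) :
    (' ' :: (k ++ [' '])) <+: (' ' :: (e ++ [' '])) ↔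
      List.splitOn ' ' k <+: List.splitOn ' ' e := by
  constructor
  · intro h; exact (prefix_pad_iff e k).mp (List.cons_prefix_cons.mp h).2
  · intro h; exact List.cons_prefix_cons.mpr ⟨rfl, (prefix_pad_iff e k).mpr h⟩

theorem infix_tail_pad_iff (e : List Char) : ∀ k : List Char,
    (' ' :: (k ++ [' '])) <:+: (e ++ [' ']) ↔
      List.splitOn ' ' k <:+: (List.splitOn ' ' e).tail := by
  induction e with
  | nil =>
    intro k
    constructor
    · intro h
      have := h.length_le
      simp at this
    · intro h
      simp only [List.splitOn, List.splitOnP_nil, List.tail_cons] at h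
      rw [List.infix_nil] at h
      exact absurd h (splitOn_ne_nil k)
  | cons c e' ih =>
    intro k
    by_cases hc : c = ' '
    · subst hc
      rw [splitOn_cons_sep]
      simp only [List.tail_cons, List.cons_append]
      rw [List.infix_cons_iff, pad_prefix_iff', ih k]
      rcases hsp : List.splitOn ' ' e' with _ | ⟨h0, tl⟩
      · exact absurd hsp (splitOn_ne_nil e')
      · simp only [List.tail_cons]
        exact List.infix_cons_iff.symm
    · rw [splitOn_cons_ne hc]
      rcases hsp : List.splitOn ' ' e' with _ | ⟨h0, tl⟩
      · exact absurd hsp (splitOn_ne_nil e')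
      simp only [List.modifyHead, List.tail_cons, List.cons_append]
      rw [List.infix_cons_iff]
      have h2 : ¬ (' ' :: (k ++ [' '])) <+: (c :: (e' ++ [' '])) := by
        intro h
        exact hc ((List.cons_prefix_cons.mp h).1).symm
      have h3 := ih k
      rw [hsp] at h3
      simp only [List.tail_cons] at h3
      tauto

theorem pad_infix_iff (k e : List Char) :
    (' ' :: (k ++ [' '])) <:+: (' ' :: (e ++ [' '])) ↔
      List.splitOn ' ' k <:+: List.splitOn ' ' e := by
  rw [List.infix_cons_iff, pad_prefix_iff', infix_tail_pad_iff e k]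
  rcases hsp : List.splitOn ' ' e with _ | ⟨h0, tl⟩
  · exact absurd hsp (splitOn_ne_nil e)
  · simp only [List.tail_cons]
    exact List.infix_cons_iff.symm

-- ---- membership in subphrases ----
theorem str_ext {s t : String} (h : s.toList = t.toList) : s = t := by
  rw [← String.ofList_toList (s := s), h, String.ofList_toList]

theorem mem_foldl_add {α β : Type} [BEq α] [LawfulBEq α] (l : List β) (f : β → α)
    (s : PySem.Set α) (y : α) :
    y ∈ l.foldl (fun s x => PySem.Set.add s (f x)) s ↔ y ∈ s ∨ ∃ x ∈ l, y = f x := by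
  rw [← PySem.Set.update_map_eq_foldl_add, PySem.Set.update_eq_append_filter]
  simp [List.mem_filter, PySem.Set.mem_ofList]
  constructor
  · rintro (h | ⟨⟨x, hx, rfl⟩, _⟩)
    · exact Or.inl h
    · exact Or.inr ⟨x, hx, rfl⟩
  · rintro (h | ⟨x, hx, rfl⟩)
    · exact Or.inl h
    · by_cases hm : f x ∈ s
      · exact Or.inl hm
      · exact Or.inr ⟨⟨x, hx, rfl⟩, by simpa using hm⟩

theorem foldl_invariant {α β : Type} (P : α → Prop) (f : α → β → α) (l : List β) (init : α)
    (h0 : P init) (hstep : ∀ a b, P a → P (f a b)) : P (l.foldl f init) := by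
  induction l generalizing init with
  | nil => exact h0
  | cons x xs ih => exact ih _ (hstep _ _ h0)

theorem nodup_foldl_add {α β : Type} [BEq α] [LawfulBEq α] (l : List β) (f : β → α)
    (s : PySem.Set α) (h : List.Nodup s) :
    List.Nodup (l.foldl (fun s x => PySem.Set.add s (f x)) s) := by
  rw [← PySem.Set.update_map_eq_foldl_add]
  exact PySem.Set.nodup_update _ _ h

theorem mem_foldl_step {α γ : Type} (l : List γ) (G : List α → γ → List α) (Q : γ → α → Prop)
    (hG : ∀ s a y, y ∈ G s a ↔ y ∈ s ∨ Q a y) (init : List α) (y : α) :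
    y ∈ l.foldl G init ↔ y ∈ init ∨ ∃ a ∈ l, Q a y := by
  induction l generalizing init with
  | nil => simp
  | cons x xs ih =>
    simp only [List.foldl_cons, ih, hG]
    constructor
    · rintro ((h | h) | ⟨a, ha, hq⟩)
      · exact Or.inl h
      · exact Or.inr ⟨x, by simp, h⟩
      · exact Or.inr ⟨a, by simp [ha], hq⟩
    · rintro (h | ⟨a, ha, hq⟩)
      · exact Or.inl (Or.inl h)
      · rcases List.mem_cons.mp ha with rfl | ha
        · exact Or.inl (Or.inr hq)
        · exact Or.inr ⟨a, ha, hq⟩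

theorem mem_subphrases (s x : String) :
    x ∈ subphrases s ↔ ∃ a b : ℕ, a < b ∧ b ≤ ((PySem.Str.split? s " ").getD []).length ∧
      x = PySem.Str.join " " ((((PySem.Str.split? s " ").getD []).drop a).take (b - a)) := by
  unfold subphrases
  set toks := (PySem.Str.split? s " ").getD [] with htoks
  rw [mem_foldl_step _ _
      (fun a y => ∃ b ∈ PySem.List.pyRange a toks.length,
        y = PySem.Str.join " " (PySem.List.slice toks (some a) (some (b+1))))
      (fun s a y => mem_foldl_add _ _ _ _)]
  simp only [PySem.Set.empty, List.not_mem_nil, false_or]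
  constructor
  · rintro ⟨a, ha, b, hb, rfl⟩
    rw [PySem.List.mem_pyRange_iff_of_pos (by norm_num)] at ha hb
    obtain ⟨ha0, han, -⟩ := ha
    obtain ⟨hab, hbn, -⟩ := hb
    refine ⟨a.toNat, b.toNat + 1, by omega, by omega, ?_⟩
    have h1 : a = ((a.toNat : ℕ) : ℤ) := by omega
    have h2 : b + 1 = (((b.toNat + 1 : ℕ)) : ℤ) := by omega
    rw [h1, h2, PySem.List.slice_natCast]
    simp only [Int.toNat_natCast]
  · rintro ⟨a, b, hab, hbn, rfl⟩
    refine ⟨(a : ℤ), ?_, ((b : ℤ) - 1), ?_, ?_⟩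
    · rw [PySem.List.mem_pyRange_iff_of_pos (by norm_num)]
      refine ⟨by omega, by omega, by simp⟩
    · rw [PySem.List.mem_pyRange_iff_of_pos (by norm_num)]
      refine ⟨by omega, by omega, by simp⟩
    · have h2 : ((b : ℤ) - 1) + 1 = ((b : ℕ) : ℤ) := by ring
      rw [h2, PySem.List.slice_natCast]

theorem infix_iff_drop_take {α : Type} (K T : List α) (hK : K ≠ []) :
    K <:+: T ↔ ∃ a b : ℕ, a < b ∧ b ≤ T.length ∧ K = (T.drop a).take (b - a) := by
  constructor
  · rintro ⟨u, w, rfl⟩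
    refine ⟨u.length, u.length + K.length, by
      have := List.length_pos_of_ne_nil hK; omega, by simp, ?_⟩
    rw [List.append_assoc, List.drop_left, Nat.add_sub_cancel_left, List.take_left]
  · rintro ⟨a, b, hab, hbn, rfl⟩
    exact ((List.take_prefix _ _).isInfix).trans ((List.drop_suffix _ _).isInfix)

theorem mem_subphrases_iff_infix (s x : String) :
    x ∈ subphrases s ↔ List.splitOn ' ' x.toList <:+: List.splitOn ' ' s.toList := by
  rw [mem_subphrases]
  have hb : ((PySem.Str.split? s " ").getD []).map String.toList = List.splitOn ' ' s.toList :=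
    toks_bridge s
  constructor
  · rintro ⟨a, b, hab, hbn, rfl⟩
    set toks := (PySem.Str.split? s " ").getD [] with htoks
    set R := (toks.drop a).take (b - a) with hR
    have hRlen : R.length = min (b - a) (toks.length - a) := by
      simp [hR]
    have hRne : R ≠ [] := by
      apply List.ne_nil_of_length_pos
      omega
    have hxl : (PySem.Str.join " " R).toList = [' '].intercalate (R.map String.toList) := by
      rw [PySem.Str.toList_join]
      rfl
    have hmapRT : R.map String.toList = (((toks.map String.toList).drop a).take (b - a)) := by
      rw [hR, List.map_take, List.map_drop]
    have hinf : R.map String.toList <:+: List.splitOn ' ' s.toList := by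
      rw [← hb, hmapRT]
      exact ((List.take_prefix _ _).isInfix).trans ((List.drop_suffix _ _).isInfix)
    have hfree : ∀ l ∈ R.map String.toList, ' ' ∉ l := by
      intro l hl
      exact splitOn_sep_free s.toList l (hinf.subset hl)
    have hsp : List.splitOn ' ' (PySem.Str.join " " R).toList = R.map String.toList := by
      rw [hxl]
      exact List.splitOn_intercalate _ ' ' hfree (by simpa using hRne)
    rw [hsp]
    exact hinf
  · intro h
    have hK : List.splitOn ' ' x.toList ≠ [] := splitOn_ne_nil _
    rw [infix_iff_drop_take _ _ hK] at h
    obtain ⟨a, b, hab, hbn, hEq⟩ := h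
    set toks := (PySem.Str.split? s " ").getD [] with htoks
    refine ⟨a, b, hab, by rw [← hb] at hbn; simpa using hbn, ?_⟩
    apply str_ext
    have h1 : x.toList = [' '].intercalate (List.splitOn ' ' x.toList) :=
      (List.intercalate_splitOn x.toList ' ').symm
    have h2 : List.splitOn ' ' x.toList = ((toks.drop a).take (b - a)).map String.toList := by
      rw [hEq, ← hb, List.map_take, List.map_drop]
    rw [h1, h2, PySem.Str.toList_join]
    rfl

theorem isIn_pad_iff (x y : String) :
    PySem.Str.isIn (" " ++ x ++ " ") (" " ++ y ++ " ") = true ↔ x ∈ subphrases y := by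
  rw [PySem.Str.isIn_iff_infix, mem_subphrases_iff_infix]
  have h : ∀ z : String, (" " ++ z ++ " ").toList = ' ' :: (z.toList ++ [' ']) := by
    intro z
    rw [String.toList_append, String.toList_append]
    rfl
  rw [h, h, pad_infix_iff]

-- ---- strip of the padded string ----
theorem strip_pad (s : String) : PySem.Str.strip (" " ++ s ++ " ") = PySem.Str.strip s := by
  apply str_ext
  rw [PySem.Str.toList_strip, PySem.Str.toList_strip]
  have h : (" " ++ s ++ " ").toList = ' ' :: (s.toList ++ [' ']) := by
    rw [String.toList_append, String.toList_append]; rfl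
  rw [h]
  unfold PySem.Chars.strip PySem.Chars.lstrip PySem.Chars.rstrip
  have hsp : PySem.Chars.isspace ' ' = true := by decide
  rw [List.dropWhile_cons_of_pos (by simpa using hsp)]
  rcases hdw : List.dropWhile PySem.Chars.isspace s.toList with _ | ⟨c, rest⟩
  · rw [List.dropWhile_append]
    simp [hdw, hsp]
  · rw [List.dropWhile_append]
    simp only [hdw]
    simp only [List.isEmpty_cons, Bool.false_eq_true, if_false]
    rw [List.reverse_append]
    simp [hsp]

-- ---- pyRange / indexing plumbing ----
theorem pyRange_succ (n : ℕ) :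
    PySem.List.pyRange 0 ((n : ℤ) + 1) 1 = PySem.List.pyRange 0 n 1 ++ [(n : ℤ)] :=
  PySem.List.pyRange_one_succ_right (by omega)

theorem pyRange_pairwise_lt (a b : ℤ) : (PySem.List.pyRange a b 1).Pairwise (· < ·) := by
  rw [PySem.List.pyRange_one]
  exact List.Pairwise.map _ (fun i j hij => by omega) List.pairwise_lt_range

theorem filter_map_index (xs : List String) (P : String → Bool) (g : String → String) :
    ((PySem.List.pyRange 0 xs.length 1).filter
        (fun i => P (PySem.List.pyGetD xs i ""))).map (fun i => g (PySem.List.pyGetD xs i ""))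
      = (xs.filter P).map g := by
  induction xs using List.reverseRecOn with
  | nil => simp [PySem.List.pyRange]
  | append_singleton ys y ih =>
    have hlen : ((ys ++ [y]).length : ℤ) = (ys.length : ℤ) + 1 := by simp
    rw [hlen, pyRange_succ]
    rw [List.filter_append, List.map_append]
    have hsame : ∀ i ∈ PySem.List.pyRange 0 ys.length 1,
        PySem.List.pyGetD (ys ++ [y]) i "" = PySem.List.pyGetD ys i "" := by
      intro i hi
      rw [PySem.List.mem_pyRange_iff_of_pos (by norm_num)] at hi
      obtain ⟨h0, hn, -⟩ := hi
      have h1 : i = ((i.toNat : ℕ) : ℤ) := by omega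
      rw [h1, PySem.List.pyGetD_natCast, PySem.List.pyGetD_natCast]
      rw [List.getD_append _ _ _ _ (by omega)]
    have hfe : (PySem.List.pyRange 0 ys.length 1).filter
          (fun i => P (PySem.List.pyGetD (ys ++ [y]) i ""))
        = (PySem.List.pyRange 0 ys.length 1).filter (fun i => P (PySem.List.pyGetD ys i "")) := by
      apply List.filter_congr
      intro i hi
      rw [hsame i hi]
    rw [hfe]
    have hy : PySem.List.pyGetD (ys ++ [y]) (ys.length : ℤ) "" = y := by
      rw [PySem.List.pyGetD_natCast]
      simp
    have hmape : ∀ l : List ℤ, (∀ i ∈ l, i ∈ PySem.List.pyRange 0 ys.length 1) →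
        l.map (fun i => g (PySem.List.pyGetD (ys ++ [y]) i ""))
          = l.map (fun i => g (PySem.List.pyGetD ys i "")) := by
      intro l hl
      apply List.map_congr_left
      intro i hi
      rw [hsame i (hl i hi)]
    rw [hmape _ (fun i hi => List.mem_of_mem_filter hi), ih]
    by_cases hP : P y
    · simp [hy, hP]
    · simp [hy, hP]

-- ---- the index dictionaries ----
theorem subphrases_nodup (s : String) : List.Nodup (subphrases s) := by
  unfold subphrases
  apply foldl_invariant (P := fun out => List.Nodup out)
  · simp [PySem.Set.empty]
  · intro a b ha
    exact nodup_foldl_add _ _ _ ha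

theorem mem_update {α : Type} [BEq α] [LawfulBEq α] (s : PySem.Set α) (xs : List α) (y : α) :
    y ∈ PySem.Set.update s xs ↔ y ∈ s ∨ y ∈ xs := by
  rw [PySem.Set.update_eq_append_filter]
  simp [List.mem_filter, PySem.Set.mem_ofList]
  constructor
  · rintro (h | ⟨h, _⟩)
    · exact Or.inl h
    · exact Or.inr h
  · rintro (h | h)
    · exact Or.inl h
    · by_cases hm : y ∈ s
      · exact Or.inl hm
      · exact Or.inr ⟨h, by simpa using hm⟩

theorem dict_multi_add : ∀ (S : List String), S.Nodup →
    ∀ (d : PySem.Dict String (List Int)) (x : String) (i : Int),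
    (S.foldl (fun d ph => d.insert ph (d.getD ph [] ++ [i])) d).getD x []
      = d.getD x [] ++ (if x ∈ S then [i] else []) := by
  intro S
  induction S with
  | nil => intro _ d x i; simp
  | cons ph S' ih =>
    intro hnd d x i
    rw [List.nodup_cons] at hnd
    simp only [List.foldl_cons]
    rw [ih hnd.2 _ x i]
    by_cases hx : x = ph
    · subst hx
      rw [PySem.Dict.getD_insert]
      simp [hnd.1]
    · rw [PySem.Dict.getD_insert]
      simp [hx]

-- proof-side names for B's index-building loop (definitionally the fold in the port)
def bstep (lows : List String)
    (st : PySem.Dict String (List Int) × PySem.Dict String (List Int)) (i : Int) :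
    PySem.Dict String (List Int) × PySem.Dict String (List Int) :=
  ((subphrases (PySem.List.pyGetD lows i "")).foldl
      (fun d ph => d.insert ph (d.getD ph [] ++ [i])) st.1,
   st.2.insert (PySem.List.pyGetD lows i "")
      (st.2.getD (PySem.List.pyGetD lows i "") [] ++ [i]))

def bidx (lows : List String) :
    PySem.Dict String (List Int) × PySem.Dict String (List Int) :=
  (PySem.List.pyRange 0 lows.length).foldl (bstep lows) (PySem.Dict.empty, PySem.Dict.empty)

theorem bidx_spec (lows : List String) : ∀ m : ℕ,
    (∀ x, (((PySem.List.pyRange 0 (m : ℤ)).foldl (bstep lows)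
        (PySem.Dict.empty, PySem.Dict.empty)).1.getD x []
      = (PySem.List.pyRange 0 (m : ℤ)).filter
          (fun i => decide (x ∈ subphrases (PySem.List.pyGetD lows i "")))))
    ∧ (∀ x, (((PySem.List.pyRange 0 (m : ℤ)).foldl (bstep lows)
        (PySem.Dict.empty, PySem.Dict.empty)).2.getD x []
      = (PySem.List.pyRange 0 (m : ℤ)).filter
          (fun i => PySem.List.pyGetD lows i "" == x))) := by
  intro m
  induction m with
  | zero =>
    have h0 : PySem.List.pyRange 0 ((0 : ℕ) : ℤ) = [] := by
      rw [Nat.cast_zero, PySem.List.pyRange_zero]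
      simp
    constructor <;> intro x <;> rw [h0] <;> simp [PySem.Dict.getD_empty]
  | succ m ih =>
    have hr : PySem.List.pyRange 0 ((m + 1 : ℕ) : ℤ)
        = PySem.List.pyRange 0 (m : ℤ) ++ [(m : ℤ)] := by
      push_cast
      exact pyRange_succ m
    rw [hr]
    simp only [List.foldl_append, List.foldl_cons, List.foldl_nil, List.filter_append]
    constructor
    · intro x
      simp only [bstep]
      rw [dict_multi_add _ (subphrases_nodup _) _ x _, ih.1 x]
      simp only [List.filter_cons, List.filter_nil]
      by_cases hx : x ∈ subphrases (PySem.List.pyGetD lows (m : ℤ) "")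
      · simp only [hx, decide_true, if_true]
      · simp only [hx, decide_false, Bool.false_eq_true, if_false, List.append_nil]
    · intro x
      simp only [bstep]
      rw [PySem.Dict.getD_insert]
      simp only [List.filter_cons, List.filter_nil]
      by_cases hx : x = PySem.List.pyGetD lows (m : ℤ) ""
      · rw [hx, if_pos rfl, ih.2 _]
        simp
      · rw [if_neg hx, ih.2 x]
        have hb : (PySem.List.pyGetD lows (m : ℤ) "" == x) = false :=
          beq_eq_false_iff_ne.mpr (fun h => hx h.symm)
        simp only [hb, Bool.false_eq_true, if_false, List.append_nil]

theorem bidx_fst (lows : List String) (x : String) :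
    (bidx lows).1.getD x [] = (PySem.List.pyRange 0 lows.length).filter
        (fun i => decide (x ∈ subphrases (PySem.List.pyGetD lows i ""))) :=
  (bidx_spec lows lows.length).1 x

theorem bidx_snd (lows : List String) (x : String) :
    (bidx lows).2.getD x [] = (PySem.List.pyRange 0 lows.length).filter
        (fun i => PySem.List.pyGetD lows i "" == x) :=
  (bidx_spec lows lows.length).2 x

-- proof-side names for B's per-keyword lookup
def pB (k low : String) : Bool := decide (k ∈ subphrases low) || decide (low ∈ subphrases k)

def hitsOf (lows : List String) (k : String) : PySem.Set Int :=
  (subphrases k).foldl (fun h ph => PySem.Set.update h ((bidx lows).2.getD ph []))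
    (PySem.Set.ofList ((bidx lows).1.getD k []))

set_option maxHeartbeats 1000000 in
theorem alt_eq (keywords entities : List String) :
    check_keywords_for_entities_alt keywords entities
      = keywords.foldl (fun mset keyword =>
          (PySem.List.sorted (hitsOf (entities.map PySem.Str.lower) (PySem.Str.lower keyword))
            (fun x => x)).foldl
            (fun mset i => PySem.Set.add mset
              (PySem.Str.strip (PySem.List.pyGetD (entities.map PySem.Str.lower) i ""))) mset)
        [] := rfl

theorem hits_mem (lows : List String) (k : String) (i : Int) :
    i ∈ hitsOf lows k ↔
      i ∈ (PySem.List.pyRange 0 lows.length).filter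
        (fun i => pB k (PySem.List.pyGetD lows i "")) := by
  unfold hitsOf
  rw [mem_foldl_step _ _ (fun ph i => i ∈ (bidx lows).2.getD ph [])
    (fun s a y => mem_update _ _ _)]
  rw [PySem.Set.mem_ofList, bidx_fst]
  simp only [bidx_snd, List.mem_filter, pB, Bool.or_eq_true, decide_eq_true_eq, beq_iff_eq]
  constructor
  · rintro (⟨hr, hx⟩ | ⟨ph, hph, hr, hx⟩)
    · exact ⟨hr, Or.inl hx⟩
    · exact ⟨hr, Or.inr (hx ▸ hph)⟩
  · rintro ⟨hr, hx | hx⟩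
    · exact Or.inl ⟨hr, hx⟩
    · exact Or.inr ⟨PySem.List.pyGetD lows i "", hx, hr, rfl⟩

theorem hits_nodup (lows : List String) (k : String) : List.Nodup (hitsOf lows k) := by
  unfold hitsOf
  apply foldl_invariant (P := fun h => List.Nodup h)
  · exact PySem.Set.nodup_ofList _
  · intro a b ha
    exact PySem.Set.nodup_update _ _ ha

theorem hits_sorted (lows : List String) (k : String) :
    PySem.List.sorted (hitsOf lows k) (fun x => x)
      = (PySem.List.pyRange 0 lows.length).filter
          (fun i => pB k (PySem.List.pyGetD lows i "")) := by
  apply PySem.List.sorted_eq_of_perm_of_pairwise_lt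
  · rw [List.perm_ext_iff_of_nodup _ (hits_nodup lows k)]
    · intro i
      exact (hits_mem lows k i).symm
    · exact ((pyRange_pairwise_lt 0 lows.length).filter _).imp (fun h => ne_of_lt h)
  · exact (pyRange_pairwise_lt 0 lows.length).filter _

theorem bool_eq_of_iff {a b : Bool} (h : a = true ↔ b = true) : a = b := by
  cases a <;> cases b <;> simp_all

theorem predA_eq_pB (keyword e : String) :
    (PySem.Str.isIn (" " ++ PySem.Str.lower keyword ++ " ") (" " ++ PySem.Str.lower e ++ " ")
      || PySem.Str.isIn (" " ++ PySem.Str.lower e ++ " ") (" " ++ PySem.Str.lower keyword ++ " "))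
      = pB (PySem.Str.lower keyword) (PySem.Str.lower e) := by
  apply bool_eq_of_iff
  unfold pB
  simp only [Bool.or_eq_true, decide_eq_true_eq]
  rw [isIn_pad_iff, isIn_pad_iff]

set_option maxHeartbeats 1000000 in
theorem step_eq (entities : List String) (keyword : String) (acc : PySem.Set String) :
    entities.foldl (fun mset entity =>
        if PySem.Str.isIn (" " ++ PySem.Str.lower keyword ++ " ")
              (" " ++ PySem.Str.lower entity ++ " ")
            || PySem.Str.isIn (" " ++ PySem.Str.lower entity ++ " ")
              (" " ++ PySem.Str.lower keyword ++ " ") then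
          PySem.Set.add mset (PySem.Str.strip (" " ++ PySem.Str.lower entity ++ " "))
        else mset) acc
      = (PySem.List.sorted (hitsOf (entities.map PySem.Str.lower) (PySem.Str.lower keyword))
          (fun x => x)).foldl
          (fun mset i => PySem.Set.add mset
            (PySem.Str.strip (PySem.List.pyGetD (entities.map PySem.Str.lower) i ""))) acc := by
  rw [PySem.List.foldl_if_eq_foldl_filter
      (fun entity => PySem.Str.isIn (" " ++ PySem.Str.lower keyword ++ " ")
              (" " ++ PySem.Str.lower entity ++ " ")
            || PySem.Str.isIn (" " ++ PySem.Str.lower entity ++ " ")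
              (" " ++ PySem.Str.lower keyword ++ " "))
      (fun mset entity => PySem.Set.add mset
        (PySem.Str.strip (" " ++ PySem.Str.lower entity ++ " ")))]
  rw [← PySem.Set.update_map_eq_foldl_add, ← PySem.Set.update_map_eq_foldl_add]
  refine congrArg (PySem.Set.update acc) ?_
  rw [hits_sorted, filter_map_index (entities.map PySem.Str.lower)
      (pB (PySem.Str.lower keyword)) PySem.Str.strip]
  rw [List.filter_map, List.map_map]
  have hfe : List.filter (fun e =>
        PySem.Str.isIn (" " ++ PySem.Str.lower keyword ++ " ") (" " ++ PySem.Str.lower e ++ " ")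
        || PySem.Str.isIn (" " ++ PySem.Str.lower e ++ " ") (" " ++ PySem.Str.lower keyword ++ " "))
        entities
      = List.filter (pB (PySem.Str.lower keyword) ∘ PySem.Str.lower) entities := by
    apply List.filter_congr
    intro e _
    simp only [Function.comp_apply]
    exact predA_eq_pB keyword e
  rw [hfe]
  apply List.map_congr_left
  intro e _
  simp only [Function.comp_apply]
  exact strip_pad _

-- ===== VERDICT (by name: the statement is the Claim_ definition above) =====
set_option maxHeartbeats 1000000 in
theorem check_keywords_for_entities_spec : Claim_equal_check_keywords_for_entities := by
  intro keywords entities _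
  unfold Spec_check_keywords_for_entities check_keywords_for_entities
  rw [alt_eq]
  apply PySem.List.foldl_congr_mem
  intro acc kw _
  exact step_eq entities kw acc
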